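-- pv_equiv track=rewrite | github.com/IlGiorg/Giorgio-learns-code | DP_Timetable2/dp_scheduler.py | validate_student
-- ===== SOURCE A (Python) =====
-- SCIENCES = {'Computer Science', 'Physics', 'Biology', 'Chemistry', 'Environmental Sciences Studies (ESS)'}
--
-- HUMANITIES = {'Economics', 'Business', 'Global Politics', 'History', 'Geography', 'Politics', 'GeoPolitics'}
--
-- ARTS = {'Arts', 'Music', 'Visual Arts'}
--
-- LANGUAGES = {'Spanish', 'French'}
--
-- ONLINE = {'Psychology (Timetabled Online)'}
--
-- def get_category(subject):
--     """Ritorna la categoria di una materia"""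
--     if subject in SCIENCES:
--         return 'Science'
--     elif subject in HUMANITIES:
--         return 'Humanity'
--     elif subject in ARTS:
--         return 'Arts'
--     elif subject in LANGUAGES:
--         return 'Language'
--     elif subject in ONLINE:
--         return 'Online'
--     return 'Unknown'
--
-- def validate_student(subjects):
--     """Verifica che la combinazione rispetti le regole (2 sci + 1 hum O 1 sci + 2 hum)"""
--     science_count = sum(1 for s in subjects if get_category(s) == 'Science')
--     humanity_count = sum(1 for s in subjects if get_category(s) == 'Humanity')
--
--     # Le lingue e arts possono contare come humanities
--     flexible_count = sum(1 for s in subjects if get_category(s) in ['Language', 'Arts'])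
--     humanity_count += flexible_count
--
--     valid = (science_count == 2 and humanity_count == 1) or \
--             (science_count == 1 and humanity_count == 2)
--
--     return valid, science_count, humanity_count
-- ===== SOURCE B (Python) =====
-- SCIENCES = {'Computer Science', 'Physics', 'Biology', 'Chemistry', 'Environmental Sciences Studies (ESS)'}
-- HUMANITIES = {'Economics', 'Business', 'Global Politics', 'History', 'Geography', 'Politics', 'GeoPolitics'}
-- ARTS = {'Arts', 'Music', 'Visual Arts'}
-- LANGUAGES = {'Spanish', 'French'}
-- ONLINE = {'Psychology (Timetabled Online)'}
--
-- def get_category(subject):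
--     if subject in SCIENCES:
--         return 'Science'
--     elif subject in HUMANITIES:
--         return 'Humanity'
--     elif subject in ARTS:
--         return 'Arts'
--     elif subject in LANGUAGES:
--         return 'Language'
--     elif subject in ONLINE:
--         return 'Online'
--     return 'Unknown'
--
-- def validate_student(subjects):
--     """Single pass: tabulate category counts, then derive the two counts by lookup."""
--     counts = {}
--     for s in subjects:
--         c = get_category(s)
--         counts[c] = counts.get(c, 0) + 1
--     science_count = counts.get('Science', 0)
--     humanity_count = counts.get('Humanity', 0) + counts.get('Arts', 0) + counts.get('Language', 0)
--     valid = (science_count == 2 and humanity_count == 1) or \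
--             (science_count == 1 and humanity_count == 2)
--     return valid, science_count, humanity_count
-- ===== Notes on version B (the rewrite author's own statement) =====
-- stated objective: simpler
-- what changed: B replaces A's three separate filtering scans over subjects with a single pass that tabulates category counts in a dict, then derives both counts by lookups with default 0.
import Mathlib
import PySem

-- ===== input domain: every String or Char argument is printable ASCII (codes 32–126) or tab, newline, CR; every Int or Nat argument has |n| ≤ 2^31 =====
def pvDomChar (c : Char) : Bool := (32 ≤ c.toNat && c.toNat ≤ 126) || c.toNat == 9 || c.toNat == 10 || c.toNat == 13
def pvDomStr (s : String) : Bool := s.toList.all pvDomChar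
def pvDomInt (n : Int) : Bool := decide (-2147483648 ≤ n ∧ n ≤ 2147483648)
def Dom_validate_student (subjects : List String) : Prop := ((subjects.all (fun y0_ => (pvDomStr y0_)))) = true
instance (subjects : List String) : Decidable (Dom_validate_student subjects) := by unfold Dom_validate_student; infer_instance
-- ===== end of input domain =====

-- B does one tabulating pass over subjects instead of A's three filtering scans; return values are identical.

-- ===== PORT A =====
def pySCIENCES : List String := ["Computer Science", "Physics", "Biology", "Chemistry", "Environmental Sciences Studies (ESS)"]
def pyHUMANITIES : List String := ["Economics", "Business", "Global Politics", "History", "Geography", "Politics", "GeoPolitics"]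
def pyARTS : List String := ["Arts", "Music", "Visual Arts"]
def pyLANGUAGES : List String := ["Spanish", "French"]
def pyONLINE : List String := ["Psychology (Timetabled Online)"]

def get_category (subject : String) : String :=
  if pySCIENCES.contains subject then "Science"
  else if pyHUMANITIES.contains subject then "Humanity"
  else if pyARTS.contains subject then "Arts"
  else if pyLANGUAGES.contains subject then "Language"
  else if pyONLINE.contains subject then "Online"
  else "Unknown"

def validate_student (subjects : List String) : Bool × Int × Int :=
  let science_count : Int := subjects.foldl (fun acc s => if get_category s = "Science" then acc + 1 else acc) 0
  let humanity_count : Int := subjects.foldl (fun acc s => if get_category s = "Humanity" then acc + 1 else acc) 0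
  let flexible_count : Int := subjects.foldl (fun acc s => if ["Language", "Arts"].contains (get_category s) then acc + 1 else acc) 0
  let humanity_count := humanity_count + flexible_count
  let valid := (science_count == 2 && humanity_count == 1) || (science_count == 1 && humanity_count == 2)
  (valid, science_count, humanity_count)

-- ===== PORT B =====
def validate_student_alt (subjects : List String) : Bool × Int × Int :=
  let counts : PySem.Dict String Int :=
    subjects.foldl (fun d s =>
      let c := get_category s
      d.insert c (d.getD c 0 + 1)) PySem.Dict.empty
  let science_count : Int := counts.getD "Science" 0
  let humanity_count : Int := counts.getD "Humanity" 0 + counts.getD "Arts" 0 + counts.getD "Language" 0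
  let valid := (science_count == 2 && humanity_count == 1) || (science_count == 1 && humanity_count == 2)
  (valid, science_count, humanity_count)

-- ===== PRECONDITION & SPEC =====
def Spec_validate_student (subjects : List String) (out : Bool × Int × Int) : Prop := out = validate_student_alt subjects
instance (subjects : List String) (out : Bool × Int × Int) : Decidable (Spec_validate_student subjects out) := by unfold Spec_validate_student; infer_instance

-- ===== CLAIM (what is proved, stated in full; the proofs are below) =====
def Claim_equal_validate_student : Prop := ∀ (subjects : List String), Dom_validate_student subjects → Spec_validate_student subjects (validate_student subjects)

-- ===== LEMMAS AND PROOFS =====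

-- A's 'sum(1 for s in l if p s)' fold equals countP.
theorem foldl_count_if_eq_countP (p : String → Prop) [DecidablePred p] (l : List String) (acc : Int) :
    l.foldl (fun a s => if p s then a + 1 else a) acc = acc + l.countP (fun s => p s) := by
  induction l generalizing acc with
  | nil => simp
  | cons x xs ih =>
    simp only [List.foldl_cons, List.countP_cons, ih]
    by_cases h : p x <;> simp [h] <;> ring

-- B's tabulating loop, from any starting dict, adds the filtering count of each category.
theorem counts_getD_aux (l : List String) (d : PySem.Dict String Int) (c : String) :
    (l.foldl (fun d s => d.insert (get_category s) (d.getD (get_category s) 0 + 1)) d).getD c 0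
      = d.getD c 0 + (l.countP (fun s => get_category s = c) : Int) := by
  induction l generalizing d with
  | nil => simp
  | cons x xs ih =>
    simp only [List.foldl_cons, List.countP_cons, ih, PySem.Dict.getD_insert]
    by_cases h : c = get_category x
    · simp only [h, decide_true]
      push_cast; ring
    · have h' : ¬ get_category x = c := fun hh => h hh.symm
      simp only [if_neg h, h', decide_false]
      push_cast; ring

-- B's tabulated count of a category equals A's filtering count.
theorem counts_getD (subjects : List String) (c : String) :
    (subjects.foldl (fun d s => d.insert (get_category s) (d.getD (get_category s) 0 + 1))
        (PySem.Dict.empty : PySem.Dict String Int)).getD c 0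
      = (subjects.countP (fun s => get_category s = c) : Int) := by
  rw [counts_getD_aux]; simp

theorem countP_flexible (subjects : List String) :
    subjects.countP (fun s => ["Language", "Arts"].contains (get_category s))
      = subjects.countP (fun s => get_category s = "Arts")
        + subjects.countP (fun s => get_category s = "Language") := by
  induction subjects with
  | nil => simp
  | cons x xs ih =>
    simp only [List.countP_cons, ih]
    by_cases h1 : get_category x = "Arts" <;> by_cases h2 : get_category x = "Language" <;>
      simp [h1, h2] at * <;> omega

-- ===== VERDICT (by name: the statement is the Claim_ definition above) =====
theorem validate_student_spec : Claim_equal_validate_student := by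
  intro subjects _
  show validate_student subjects = validate_student_alt subjects
  unfold validate_student validate_student_alt
  simp only [foldl_count_if_eq_countP, counts_getD, zero_add, Bool.decide_eq_true]
  rw [countP_flexible]
  push_cast
  ring_nf
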